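-- pv_equiv track=rewrite | github.com/brianschubert/rtm-wrapper | src/rtm_wrapper/plot.py | _resolve_dims
-- ===== SOURCE A (Python) =====
-- def _resolve_dims(valid_dims: list[str], given_dims: list[str | None]) -> list[str]:
--     if len(valid_dims) != len(given_dims):
--         raise ValueError(
--             f"dimension count mismatch - there are {len(valid_dims)} valid dimension,"
--             f"but {len(given_dims)} resolved dimensions were requested"
--         )
--
--     # Assume valid dims are unique.
--     # Reverse so the left-most entries are popped first.
--     unused_dims: list[str] = list(reversed(valid_dims))
--
--     # Remove dims that have already been fixed.
--     # Dim lists should be sort, so linear overhead is ok.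
--     for given in given_dims:
--         if given is None:
--             continue
--
--         if given not in valid_dims:
--             raise ValueError(
--                 f"invalid dimension '{given}' - must be one of {valid_dims}"
--             )
--         try:
--             unused_dims.remove(given)
--         except ValueError:
--             raise ValueError(f"dimension '{given}' used more than once")
--
--     resolved_dims: list[str] = []
--
--     # Resolve dims by filling in 'None' values with unused dims.
--     for given in given_dims:
--         if given is None:
--             resolved_dims.append(unused_dims.pop())
--         else:
--             resolved_dims.append(given)
--
--     return resolved_dims
-- ===== SOURCE B (Python) =====
-- def _resolve_dims(valid_dims, given_dims):
--     if len(valid_dims) != len(given_dims):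
--         raise ValueError(
--             f"dimension count mismatch - there are {len(valid_dims)} valid dimension,"
--             f"but {len(given_dims)} resolved dimensions were requested"
--         )
--
--     # Staged checks on the fixed (non-None) entries instead of A's remove bookkeeping.
--     fixed = [g for g in given_dims if g is not None]
--     for g in fixed:
--         if g not in valid_dims:
--             raise ValueError(
--                 f"invalid dimension '{g}' - must be one of {valid_dims}"
--             )
--     if len(set(fixed)) != len(fixed):
--         dup = next(g for g in fixed if fixed.count(g) > 1)
--         raise ValueError(f"dimension '{dup}' used more than once")
--
--     # Unused dims in original order; fill the None slots from the front.
--     it = iter(d for d in valid_dims if d not in fixed)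
--     return [g if g is not None else next(it) for g in given_dims]
-- ===== Notes on version B (the rewrite author's own statement) =====
-- stated objective: simpler
-- what changed: replaces A's reversed-copy/remove/pop bookkeeping with staged passes: extract the fixed dims, validate membership and duplicates wholesale (via set cardinality), then fill None slots from the unused dims in original order
-- outside the precondition, e.g. on _resolve_dims(['a', 'a'], ['a', 'a']): A returns ['a', 'a'], B raises ValueError
import Mathlib
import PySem

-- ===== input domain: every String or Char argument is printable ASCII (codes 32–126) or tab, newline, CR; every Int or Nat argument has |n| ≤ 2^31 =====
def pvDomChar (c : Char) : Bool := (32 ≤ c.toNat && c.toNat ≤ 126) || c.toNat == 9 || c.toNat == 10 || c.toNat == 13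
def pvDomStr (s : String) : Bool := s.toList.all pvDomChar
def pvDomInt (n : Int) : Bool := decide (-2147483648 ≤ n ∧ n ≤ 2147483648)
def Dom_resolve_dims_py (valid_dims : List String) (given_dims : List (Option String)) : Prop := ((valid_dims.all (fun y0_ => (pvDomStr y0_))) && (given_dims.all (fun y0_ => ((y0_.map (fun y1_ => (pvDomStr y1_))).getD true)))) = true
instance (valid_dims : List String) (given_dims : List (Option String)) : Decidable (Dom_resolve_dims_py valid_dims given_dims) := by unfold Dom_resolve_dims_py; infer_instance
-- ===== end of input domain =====

-- B replaces A's reversed-copy/remove/pop bookkeeping with staged passes (extract the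
-- fixed dims, validate them wholesale, fill None slots from the unused dims in order)
-- (objective: simpler); equivalence is claimed on Pre_ below.

-- ===== PORT A =====
-- first loop of A: validate each given dim and remove it from unused_dims;
-- none = a ValueError was raised (invalid dim, or used more than once)
def pvA_removeLoop (valid_dims : List String) (unused : List String) : List (Option String) → Option (List String)
  | [] => some unused
  | none :: gs => pvA_removeLoop valid_dims unused gs
  | some g :: gs =>
    if g ∈ valid_dims then
      match PySem.List.remove? unused g with
      | some u => pvA_removeLoop valid_dims u gs
      | none => none
    else none

-- second loop of A: fill None slots with unused_dims.pop()
def pvA_fillLoop (unused : List String) (acc : List String) : List (Option String) → List String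
  | [] => acc
  | none :: gs =>
    match PySem.List.pop? unused (-1) with
    | some (x, u) => pvA_fillLoop u (acc ++ [x]) gs
    | none => acc   -- IndexError (unreachable when A returns; outside Pre_)
  | some g :: gs => pvA_fillLoop unused (acc ++ [g]) gs

def resolve_dims_py (valid_dims : List String) (given_dims : List (Option String)) : List String :=
  if valid_dims.length ≠ given_dims.length then []   -- ValueError: outside Pre_
  else
    match pvA_removeLoop valid_dims valid_dims.reverse given_dims with
    | none => []                                      -- ValueError: outside Pre_
    | some unused => pvA_fillLoop unused [] given_dims

-- ===== PORT B =====
-- [g for g in given_dims if g is not None]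
def pvB_fixed : List (Option String) → List String
  | [] => []
  | none :: gs => pvB_fixed gs
  | some g :: gs => g :: pvB_fixed gs

-- [g if g is not None else next(it) for g in given_dims]
def pvB_fill (unused : List String) : List (Option String) → List String
  | [] => []
  | none :: gs =>
    match unused with
    | x :: u => x :: pvB_fill u gs
    | [] => []       -- StopIteration (unreachable when B returns; outside Pre_)
  | some g :: gs => g :: pvB_fill unused gs

def resolve_dims_py_alt (valid_dims : List String) (given_dims : List (Option String)) : List String :=
  if valid_dims.length ≠ given_dims.length then []   -- ValueError: outside Pre_
  else
    let fixed := pvB_fixed given_dims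
    if ¬ (fixed.all (fun g => decide (g ∈ valid_dims))) then []        -- ValueError: outside Pre_
    else if (PySem.Set.ofList fixed).length ≠ fixed.length then []     -- ValueError: outside Pre_
    else pvB_fill (valid_dims.filter (fun d => !(fixed.contains d))) given_dims

-- ===== PRECONDITION & SPEC =====
-- Pre_ excludes (a) the inputs where A raises ValueError (length mismatch, a given
-- dim not in valid_dims, a given dim occurring twice), and (b) valid_dims with
-- duplicate entries, a corner A's own comment assumes away ("Assume valid dims are
-- unique") and on which A's multiset-removal behaviour is accidental (B raises there).
def Pre_resolve_dims_py (valid_dims : List String) (given_dims : List (Option String)) : Prop :=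
  valid_dims.Nodup ∧ valid_dims.length = given_dims.length ∧
  (given_dims.all (fun g =>
    match g with
    | none => true
    | some s => decide (s ∈ valid_dims) && decide (given_dims.count (some s) ≤ 1))) = true
instance (valid_dims : List String) (given_dims : List (Option String)) : Decidable (Pre_resolve_dims_py valid_dims given_dims) := by unfold Pre_resolve_dims_py; infer_instance

def pvWitness_resolve_dims_py : List String × List (Option String) :=
  (["x", "y", "z"], [some "y", none, none])

def Spec_resolve_dims_py (valid_dims : List String) (given_dims : List (Option String)) (out : List String) : Prop := out = resolve_dims_py_alt valid_dims given_dims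
instance (valid_dims : List String) (given_dims : List (Option String)) (out : List String) : Decidable (Spec_resolve_dims_py valid_dims given_dims out) := by unfold Spec_resolve_dims_py; infer_instance

-- ===== CLAIM (what is proved, stated in full; the proofs are below) =====
def Claim_equal_resolve_dims_py : Prop := ∀ (valid_dims : List String) (given_dims : List (Option String)), Dom_resolve_dims_py valid_dims given_dims → Pre_resolve_dims_py valid_dims given_dims → Spec_resolve_dims_py valid_dims given_dims (resolve_dims_py valid_dims given_dims)

-- ===== LEMMAS AND PROOFS =====

theorem mem_pvB_fixed (gs : List (Option String)) (s : String) :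
    s ∈ pvB_fixed gs ↔ some s ∈ gs := by
  induction gs with
  | nil => simp [pvB_fixed]
  | cons g gs ih =>
    match g with
    | none => simp [pvB_fixed, ih]
    | some t => simp [pvB_fixed, ih]

theorem count_pvB_fixed (gs : List (Option String)) (s : String) :
    (pvB_fixed gs).count s = gs.count (some s) := by
  induction gs with
  | nil => simp [pvB_fixed]
  | cons g gs ih =>
    match g with
    | none => simp [pvB_fixed, ih]
    | some t =>
      by_cases h : t = s
      · subst h; simp [pvB_fixed, ih]
      · simp [pvB_fixed, ih, h]

-- A's pop-from-the-back loop over a reversed list is B's take-from-the-front fill.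
theorem pvA_fill_eq_pvB_fill (gs : List (Option String)) :
    ∀ (l acc : List String), pvA_fillLoop l.reverse acc gs = acc ++ pvB_fill l gs := by
  induction gs with
  | nil => intro l acc; simp [pvA_fillLoop, pvB_fill]
  | cons g gs ih =>
    intro l acc
    match g with
    | some s => simp [pvA_fillLoop, pvB_fill, ih l (acc ++ [s])]
    | none =>
      match l with
      | [] => simp [pvA_fillLoop, pvB_fill, PySem.List.pop?]
      | x :: t =>
        have hp := PySem.List.pop?_last t.reverse x
        simp [pvA_fillLoop, pvB_fill, hp, ih t (acc ++ [x])]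

-- one removal step: removing g from the reversed unused list = appending g to done
theorem remove_step (valid : List String) (done : List String) (g : String)
    (hnd : valid.Nodup) (hg : g ∈ valid) (hgs : g ∉ done) :
    PySem.List.remove? ((valid.filter (fun d => !(done.contains d))).reverse) g
      = some ((valid.filter (fun d => !((done ++ [g]).contains d))).reverse) := by
  have hmemF : g ∈ valid.filter (fun d => !(done.contains d)) := by
    simp [List.mem_filter, hg, hgs]
  have hmem : g ∈ (valid.filter (fun d => !(done.contains d))).reverse := by
    simpa using hmemF
  have hndF : ((valid.filter (fun d => !(done.contains d))).reverse).Nodup := by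
    simpa using hnd.filter _
  rw [PySem.List.remove?_eq_some_erase _ g hmem, hndF.erase_eq_filter, List.filter_reverse]
  congr 1
  rw [List.filter_filter]
  congr 1
  apply List.filter_congr
  intro d _
  by_cases hdg : d = g
  · subst hdg; simp
  · simp [hdg]

-- main loop invariant: A's remove loop tracks the fixed dims gathered so far through
-- unused = (valid.filter (∉ done ++ fixed-of-the-rest)).reverse
theorem loop_invariant (valid : List String) (hnd : valid.Nodup) :
    ∀ (gs : List (Option String)) (done : List String),
    (∀ s : String, some s ∈ gs → s ∈ valid ∧ s ∉ done ∧ gs.count (some s) ≤ 1) →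
    pvA_removeLoop valid ((valid.filter (fun d => !(done.contains d))).reverse) gs
      = some ((valid.filter (fun d => !((done ++ pvB_fixed gs).contains d))).reverse) := by
  intro gs
  induction gs with
  | nil => intro done _; simp [pvA_removeLoop, pvB_fixed]
  | cons g gs ih =>
    intro done hinv
    match g with
    | none =>
      have h := ih done (fun s hs => by
        have := hinv s (by simp [hs])
        refine ⟨this.1, this.2.1, ?_⟩
        have := this.2.2
        simp at this ⊢
        omega)
      simpa [pvA_removeLoop, pvB_fixed] using h
    | some s =>
      obtain ⟨hsv, hss, hcnt⟩ := hinv s (by simp)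
      have hcnt0 : gs.count (some s) = 0 := by
        simp at hcnt; omega
      have hnotin : some s ∉ gs := by
        intro h
        have := List.count_pos_iff.mpr h
        omega
      have hinv' : ∀ t : String, some t ∈ gs → t ∈ valid ∧ t ∉ done ++ [s] ∧ gs.count (some t) ≤ 1 := by
        intro t ht
        have := hinv t (by simp [ht])
        have hts : t ≠ s := by
          intro he; subst he; exact hnotin ht
        refine ⟨this.1, by simp [this.2.1, hts], ?_⟩
        have hle := this.2.2
        rw [show (some s :: gs).count (some t) = gs.count (some t) from by
          simp [Ne.symm hts]] at hle
        exact hle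
      have h := ih (done ++ [s]) hinv'
      simp only [pvA_removeLoop]
      rw [if_pos hsv, remove_step valid done s hnd hsv hss]
      simpa [pvB_fixed, List.append_assoc] using h

theorem resolve_dims_eq (valid_dims : List String) (given_dims : List (Option String))
    (hpre : Pre_resolve_dims_py valid_dims given_dims) :
    resolve_dims_py valid_dims given_dims = resolve_dims_py_alt valid_dims given_dims := by
  obtain ⟨hnd, hlen, hall⟩ := hpre
  rw [List.all_eq_true] at hall
  have hprops : ∀ s : String, some s ∈ given_dims → s ∈ valid_dims ∧ given_dims.count (some s) ≤ 1 := by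
    intro s hs
    have := hall (some s) hs
    simp at this
    exact this
  -- B's guards both pass
  have hfx_mem : ∀ s ∈ pvB_fixed given_dims, s ∈ valid_dims := by
    intro s hs
    exact (hprops s ((mem_pvB_fixed given_dims s).mp hs)).1
  have hfx_nodup : (pvB_fixed given_dims).Nodup := by
    rw [List.nodup_iff_count_le_one]
    intro s
    by_cases h : s ∈ pvB_fixed given_dims
    · rw [count_pvB_fixed]
      exact (hprops s ((mem_pvB_fixed given_dims s).mp h)).2
    · simp [List.count_eq_zero_of_not_mem h]
  -- A's loop succeeds with unused = (valid.filter (∉ fixed)).reverse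
  have hloop := loop_invariant valid_dims hnd given_dims []
    (fun s hs => ⟨(hprops s hs).1, by simp, (hprops s hs).2⟩)
  simp only [List.nil_append, List.contains_nil] at hloop
  unfold resolve_dims_py resolve_dims_py_alt
  rw [if_neg (by omega), if_neg (by omega)]
  have hstart : valid_dims.filter (fun d => !(false : Bool)) = valid_dims := by simp
  rw [show ((valid_dims.filter fun d => !false).reverse) = valid_dims.reverse from by rw [hstart]] at hloop
  rw [hloop]
  rw [if_neg (by simp [List.all_eq_true]; intro s hs; exact hfx_mem s hs),
      if_neg (by rw [PySem.Set.ofList_eq_self_of_nodup _ hfx_nodup]; simp)]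
  exact pvA_fill_eq_pvB_fill given_dims (valid_dims.filter (fun d => !((pvB_fixed given_dims).contains d))) []

-- ===== VERDICT (by name: the statement is the Claim_ definition above) =====
theorem resolve_dims_py_spec : Claim_equal_resolve_dims_py := by
  intro valid_dims given_dims _ hpre
  exact resolve_dims_eq valid_dims given_dims hpre
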